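-- pv_equiv track=rewrite | github.com/AlejandroUPC/leetcode | exercises/3745-maximie-exp-three-elements/main.py | solution
-- ===== SOURCE A (Python) =====
-- def solution(nums: list[int]) -> int:
--     smallest: int = 101
--     biggest = [-101]
--     for n in nums:
--         if n < smallest:
--             smallest = n
--         if n > min(biggest):
--             biggest = [n, max(biggest)]
--     return sum(biggest) - smallest
-- ===== SOURCE B (Python) =====
-- def solution(nums: list[int]) -> int:
--     s = sorted(nums)
--     return s[-1] + s[-2] - s[0]
-- ===== Notes on version B (the rewrite author's own statement) =====
-- stated objective: simpler
-- what changed: Replaced A's one-pass scan that maintains a running minimum and a two-element 'biggest' list with sentinels by a plain sort-then-index: sort the list and return last + second-to-last - first; Pre_ excludes lists with fewer than 2 elements, where A returns sentinel-derived values and B raises IndexError.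
-- intended difference: On lists of length at least 2 whose values stray outside the small range A's sentinels assume -- every element above 101, or fewer than two elements of at least -101 -- A's sentinels leak into the result (e.g. A([200,300])=399, using the sentinel 101 as the 'smallest'), while B returns the true sum of the two largest minus the smallest (300), which is the function's intent. — e.g. on solution([200, 300]): A returns 399, B returns 300
-- outside the precondition, e.g. on solution([]): A returns -202, B raises IndexError; on solution([5]): A returns -101, B raises IndexError
import Mathlib
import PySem

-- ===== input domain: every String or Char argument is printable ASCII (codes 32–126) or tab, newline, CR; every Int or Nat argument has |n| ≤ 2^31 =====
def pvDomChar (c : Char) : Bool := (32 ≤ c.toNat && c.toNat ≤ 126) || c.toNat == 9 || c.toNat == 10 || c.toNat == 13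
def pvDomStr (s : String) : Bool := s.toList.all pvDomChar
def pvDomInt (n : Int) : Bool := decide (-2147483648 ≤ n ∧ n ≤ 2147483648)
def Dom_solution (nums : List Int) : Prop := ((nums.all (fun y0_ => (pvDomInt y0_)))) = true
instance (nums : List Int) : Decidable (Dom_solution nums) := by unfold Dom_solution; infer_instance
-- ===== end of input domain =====

-- B sorts the list and reads off last + second-to-last - first (objective: simpler).

-- ===== PORT A =====
-- loop body of A's for-loop; A's `biggest` list is always nonempty, so the `.getD 0`
-- default of min?/max? (Python min/max of a nonempty list) is never used
def loopA (st : Int × List Int) (n : Int) : Int × List Int :=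
  let smallest := if n < st.1 then n else st.1
  let biggest :=
    if (PySem.List.min? st.2 (fun y => y)).getD 0 < n then
      [n, (PySem.List.max? st.2 (fun y => y)).getD 0]
    else st.2
  (smallest, biggest)

def solution (nums : List Int) : Int :=
  let st := nums.foldl loopA (101, [-101])
  st.2.sum - st.1

-- ===== PORT B =====
-- s[-1], s[-2], s[0]; Pre_solution (2 ≤ length) keeps all three indices in range,
-- so the `pyGetD … 0` default is never used (Python would raise IndexError there)
def solution_alt (nums : List Int) : Int :=
  let s := PySem.List.sorted nums (fun y => y) false
  PySem.List.pyGetD s (-1) 0 + PySem.List.pyGetD s (-2) 0 - PySem.List.pyGetD s 0 0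

-- ===== PRECONDITION & SPEC =====
-- Pre_ excludes lists with fewer than 2 elements: there B's indexing raises IndexError,
-- while A returns values made of its sentinels (-202 on [], n - 101 on [n]).
def Pre_solution (nums : List Int) : Prop := 2 ≤ nums.length
instance (nums : List Int) : Decidable (Pre_solution nums) := by unfold Pre_solution; infer_instance
def pvWitness_solution : List Int := [1, 2]

-- On lists whose values stray outside the small range A's sentinels assume — every element above 101, or
-- fewer than two elements ≥ -101 — A's 101/-101 sentinels leak into the result, while B
-- returns the true sum of the two largest minus the smallest, the function's intent.
def D_solution (nums : List Int) : Prop :=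
  (nums.countP (fun n => decide (-101 ≤ n)) ≤ 1 ∨ ∀ n ∈ nums, n ≤ -101) ∨ (∀ n ∈ nums, 101 < n)
instance (nums : List Int) : Decidable (D_solution nums) := by unfold D_solution; infer_instance

def Spec_solution (nums : List Int) (out : Int) : Prop := ¬ D_solution nums → out = solution_alt nums
instance (nums : List Int) (out : Int) : Decidable (Spec_solution nums out) := by unfold Spec_solution; infer_instance

def pvDiffWitness_solution : List Int := [200, 300]
def pvDiffWitnessOut_solution : Int × Int := (399, 300)

-- ===== CLAIM (what is proved, stated in full; the proofs are below) =====
def Claim_unchanged_solution : Prop := ∀ (nums : List Int), Dom_solution nums → Pre_solution nums → Spec_solution nums (solution nums)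
def Claim_changed_solution : Prop := Dom_solution (pvDiffWitness_solution) ∧ Pre_solution (pvDiffWitness_solution) ∧ D_solution (pvDiffWitness_solution) ∧ solution (pvDiffWitness_solution) = pvDiffWitnessOut_solution.1 ∧ solution_alt (pvDiffWitness_solution) = pvDiffWitnessOut_solution.2 ∧ pvDiffWitnessOut_solution.1 ≠ pvDiffWitnessOut_solution.2
def Claim_exact_solution : Prop := ∀ (nums : List Int), Dom_solution nums → Pre_solution nums → D_solution nums → solution nums ≠ solution_alt nums

-- ===== LEMMAS AND PROOFS =====

-- reference pair fold: A's `biggest` list abstracted to an ordered pair (lo, hi)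
def stepP (p : Int × Int) (n : Int) : Int × Int :=
  if p.1 < n then (min p.2 n, max p.2 n) else p

theorem stepP_le (p : Int × Int) (n : Int) (h : p.1 ≤ p.2) : (stepP p n).1 ≤ (stepP p n).2 := by
  unfold stepP; split_ifs <;> omega

theorem foldP_le (l : List Int) (p : Int × Int) (h : p.1 ≤ p.2) :
    (l.foldl stepP p).1 ≤ (l.foldl stepP p).2 := by
  induction l generalizing p with
  | nil => exact h
  | cons n l ih => exact ih _ (stepP_le p n h)

theorem stepP_lo_mono (p : Int × Int) (n : Int) (h : p.1 ≤ p.2) : p.1 ≤ (stepP p n).1 := by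
  unfold stepP; split_ifs <;> omega

theorem foldP_lo_mono (l : List Int) (p : Int × Int) (h : p.1 ≤ p.2) :
    p.1 ≤ (l.foldl stepP p).1 := by
  induction l generalizing p with
  | nil => exact le_refl _
  | cons n l ih => exact le_trans (stepP_lo_mono p n h) (ih _ (stepP_le p n h))

theorem stepP_hi_mono (p : Int × Int) (n : Int) : p.2 ≤ (stepP p n).2 := by
  unfold stepP; split_ifs <;> omega

theorem foldP_hi_mono (l : List Int) (p : Int × Int) : p.2 ≤ (l.foldl stepP p).2 := by
  induction l generalizing p with
  | nil => exact le_refl _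
  | cons n l ih => exact le_trans (stepP_hi_mono p n) (ih _)

theorem foldP_hi_trigger (l : List Int) (p : Int × Int) (hle : p.1 ≤ p.2)
    (h : ∃ m ∈ l, -101 < m) : -101 < (l.foldl stepP p).2 := by
  induction l generalizing p with
  | nil => simp at h
  | cons n l ih =>
    obtain ⟨m, hm, hm2⟩ := h
    rcases List.mem_cons.1 hm with rfl | hm
    · have h1 : -101 < (stepP p m).2 := by unfold stepP; split_ifs <;> omega
      have h2 := foldP_hi_mono l (stepP p m)
      simp only [List.foldl_cons]; omega
    · simp only [List.foldl_cons]
      exact ih _ (stepP_le p n hle) ⟨m, hm, hm2⟩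

-- the invariant tying A's list state to the pair state
def InvLP (L : List Int) (p : Int × Int) : Prop :=
  (L = [-101] ∧ p = (-101, -101)) ∨
  (∃ a b, L = [a, b] ∧ p.1 = min a b ∧ p.2 = max a b ∧ -101 ≤ p.1 ∧ -101 < p.2)

theorem foldA_fst (l : List Int) (s : Int) (L : List Int) :
    (l.foldl loopA (s, L)).1 = l.foldl min s := by
  induction l generalizing s L with
  | nil => rfl
  | cons n l ih =>
    simp only [List.foldl_cons]
    have hA : loopA (s, L) n = (min s n, (loopA (s, L) n).2) := by
      unfold loopA; simp only []
      congr 1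
      rw [min_def]; split_ifs <;> omega
    rw [hA, ih]

theorem loopA_inv (s : Int) (L : List Int) (p : Int × Int) (n : Int) (h : InvLP L p) :
    InvLP (loopA (s, L) n).2 (stepP p n) := by
  rcases h with ⟨hL, hp⟩ | ⟨a, b, hL, h1, h2, h3, h4⟩
  · subst hL; subst hp
    have e1 : (loopA (s, [-101]) n).2 = if (-101 : Int) < n then [n, -101] else [-101] := by
      simp [loopA, PySem.List.min?_id_cons, PySem.List.max?_id_cons]
    have e2 : stepP (-101, -101) n =
        if (-101 : Int) < n then (min (-101) n, max (-101) n) else (-101, -101) := rfl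
    by_cases hc : (-101 : Int) < n
    · rw [e1, e2, if_pos hc, if_pos hc]
      right; exact ⟨n, -101, rfl, by omega, by omega, by omega, by omega⟩
    · rw [e1, e2, if_neg hc, if_neg hc]
      left; exact ⟨rfl, rfl⟩
  · subst hL
    have e1 : (loopA (s, [a, b]) n).2 = if min a b < n then [n, max a b] else [a, b] := by
      simp [loopA, PySem.List.min?_id_cons, PySem.List.max?_id_cons]
    have e2 : stepP p n = if p.1 < n then (min p.2 n, max p.2 n) else p := rfl
    by_cases hc : min a b < n
    · rw [e1, if_pos hc, e2, if_pos (by omega : p.1 < n)]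
      right; exact ⟨n, max a b, rfl, by omega, by omega, by omega, by omega⟩
    · rw [e1, if_neg hc, e2, if_neg (by omega : ¬ p.1 < n)]
      right; exact ⟨a, b, rfl, h1, h2, h3, h4⟩

theorem foldA_snd_inv (l : List Int) (s : Int) (L : List Int) (p : Int × Int) (h : InvLP L p) :
    InvLP (l.foldl loopA (s, L)).2 (l.foldl stepP p) := by
  induction l generalizing s L p with
  | nil => exact h
  | cons n l ih =>
    simp only [List.foldl_cons]
    have h2 := loopA_inv s L p n h
    have hx : loopA (s, L) n = ((loopA (s, L) n).1, (loopA (s, L) n).2) := rfl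
    rw [hx]
    exact ih _ _ _ h2

-- generic cons-rearrangement permutations (via counting)
theorem perm_rot3 (x a b : Int) (t : List Int) : (x :: a :: b :: t).Perm (a :: b :: x :: t) :=
  List.perm_iff_count.2 (by intro y; simp [List.count_cons]; split_ifs <;> omega)

theorem perm_swap2 (a b : Int) (t : List Int) : (a :: b :: t).Perm (b :: a :: t) :=
  List.perm_iff_count.2 (by intro y; simp [List.count_cons]; split_ifs <;> omega)

theorem perm_minmax (a b : Int) (t : List Int) : (a :: b :: t).Perm (min a b :: max a b :: t) := by
  rcases le_total a b with h | h
  · rw [min_eq_left h, max_eq_right h]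
  · rw [min_eq_right h, max_eq_left h]
    exact perm_swap2 a b t

-- the pair fold computes the two largest of the pool {p.1, p.2} ∪ l
theorem foldP_top2 (l : List Int) (p : Int × Int) (hle : p.1 ≤ p.2) :
    ∃ r : List Int,
      (p.1 :: p.2 :: l).Perm ((l.foldl stepP p).1 :: (l.foldl stepP p).2 :: r) ∧
      ∀ x ∈ r, x ≤ (l.foldl stepP p).1 := by
  induction l generalizing p with
  | nil => exact ⟨[], List.Perm.refl _, by simp⟩
  | cons n l ih =>
    obtain ⟨r, hperm, hr⟩ := ih (stepP p n) (stepP_le p n hle)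
    simp only [List.foldl_cons] at *
    by_cases hc : p.1 < n
    · have hs : stepP p n = (min p.2 n, max p.2 n) := by unfold stepP; rw [if_pos hc]
      refine ⟨p.1 :: r, ?_, ?_⟩
      · have c1 : (p.1 :: p.2 :: n :: l).Perm (p.1 :: (stepP p n).1 :: (stepP p n).2 :: l) :=
          List.Perm.cons p.1 (by rw [hs]; exact perm_minmax p.2 n l)
        have c2 : (p.1 :: (stepP p n).1 :: (stepP p n).2 :: l).Perm
            (p.1 :: (l.foldl stepP (stepP p n)).1 :: (l.foldl stepP (stepP p n)).2 :: r) :=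
          List.Perm.cons p.1 hperm
        exact (c1.trans c2).trans (perm_rot3 _ _ _ _)
      · intro x hx
        rcases List.mem_cons.1 hx with rfl | hx
        · have m1 : p.1 ≤ (stepP p n).1 := stepP_lo_mono p n hle
          have m2 := foldP_lo_mono l (stepP p n) (stepP_le p n hle)
          omega
        · exact hr x hx
    · have hs : stepP p n = p := by unfold stepP; rw [if_neg hc]
      rw [hs] at hperm hr ⊢
      refine ⟨n :: r, ?_, ?_⟩
      · have c1 : (p.1 :: p.2 :: n :: l).Perm (n :: p.1 :: p.2 :: l) :=
          (perm_rot3 n p.1 p.2 l).symm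
        have c2 : (n :: p.1 :: p.2 :: l).Perm
            (n :: (l.foldl stepP p).1 :: (l.foldl stepP p).2 :: r) := List.Perm.cons n hperm
        exact (c1.trans c2).trans (perm_rot3 _ _ _ _)
      · intro x hx
        rcases List.mem_cons.1 hx with rfl | hx
        · have m2 := foldP_lo_mono l p hle
          omega
        · exact hr x hx

theorem decomp2 (s : List Int) (h : 2 ≤ s.length) : ∃ u p q, s = u ++ [p, q] := by
  induction s with
  | nil => simp at h
  | cons x s ih =>
    by_cases hs : 2 ≤ s.length
    · obtain ⟨u, p, q, rfl⟩ := ih hs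
      exact ⟨x :: u, p, q, rfl⟩
    · have h1 : s.length = 1 := by simp at h; omega
      obtain ⟨y, rfl⟩ := List.length_eq_one_iff.1 h1
      exact ⟨[], x, y, rfl⟩

-- maxima of permuted lists agree
theorem max_eq_of_perm {l1 l2 : List Int} (h : l1.Perm l2) {m1 m2 : Int}
    (hm1 : m1 ∈ l1) (h1 : ∀ x ∈ l1, x ≤ m1) (hm2 : m2 ∈ l2) (h2 : ∀ x ∈ l2, x ≤ m2) :
    m1 = m2 :=
  le_antisymm (h2 m1 (h.mem_iff.1 hm1)) (h1 m2 (h.mem_iff.2 hm2))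

-- foldl min facts
theorem foldl_min_mem (l : List Int) (a : Int) : l.foldl min a ∈ a :: l := by
  induction l generalizing a with
  | nil => simp
  | cons n l ih =>
    simp only [List.foldl_cons]
    rcases List.mem_cons.1 (ih (min a n)) with he | hm
    · rw [he]
      rcases min_cases a n with ⟨h1, _⟩ | ⟨h1, _⟩ <;> simp [h1]
    · simp [hm]

theorem foldl_min_le (l : List Int) (a : Int) : ∀ x ∈ a :: l, l.foldl min a ≤ x := by
  induction l generalizing a with
  | nil => simp
  | cons n l ih =>
    intro x hx
    have h1 := ih (min a n)
    rcases List.mem_cons.1 hx with rfl | hx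
    · exact le_trans (h1 (min x n) (by simp)) (min_le_left _ _)
    · rcases List.mem_cons.1 hx with rfl | hx
      · exact le_trans (h1 (min a x) (by simp)) (min_le_right _ _)
      · exact h1 x (by simp [hx])

theorem getD_zero_mem (l : List Int) (d : Int) (h : l ≠ []) : l.getD 0 d ∈ l := by
  cases l with
  | nil => exact absurd rfl h
  | cons x t => simp

-- A's value once the `biggest` update has fired at least once
theorem A_triggered (nums : List Int) (h : ∃ m ∈ nums, -101 < m) :
    solution nums =
      (nums.foldl stepP (-101, -101)).1 + (nums.foldl stepP (-101, -101)).2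
        - nums.foldl min 101 := by
  have hFhi : -101 < (nums.foldl stepP (-101, -101)).2 :=
    foldP_hi_trigger nums (-101, -101) (by norm_num) h
  have hinv := foldA_snd_inv nums 101 [-101] (-101, -101) (Or.inl ⟨rfl, rfl⟩)
  rcases hinv with ⟨_, hp⟩ | ⟨a, b, hL, h1, h2, h3, h4⟩
  · rw [hp] at hFhi; norm_num at hFhi
  · show (nums.foldl loopA (101, [-101])).2.sum - (nums.foldl loopA (101, [-101])).1 = _
    rw [hL, foldA_fst]
    simp only [List.sum_cons, List.sum_nil]
    omega

-- when every element is at most -101, A's `biggest` list never updates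
theorem foldA_stay (l : List Int) (s : Int) (hall : ∀ n ∈ l, n ≤ -101) :
    l.foldl loopA (s, [-101]) = (l.foldl min s, [-101]) := by
  induction l generalizing s with
  | nil => rfl
  | cons n l ih =>
    have hn : n ≤ -101 := hall n (by simp)
    have e : loopA (s, [-101]) n = (min s n, [-101]) := by
      unfold loopA
      simp only [PySem.List.min?_id_cons, PySem.List.max?_id_cons, List.foldl_nil,
        Option.getD_some]
      rw [if_neg (by omega : ¬ ((-101 : Int) < n))]
      simp only [Prod.mk.injEq]
      refine ⟨?_, trivial⟩
      rw [min_def]; split_ifs <;> omega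
    simp only [List.foldl_cons, e]
    exact ih _ (fun m hm => hall m (by simp [hm]))

-- the pair fold's result is (second-largest-of-pool, largest) = (max p (-101), q)
theorem pool_top (nums u : List Int) (p q : Int)
    (hs : PySem.List.sorted nums (fun y => y) false = u ++ [p, q])
    (h : ∃ m ∈ nums, -101 < m) :
    (nums.foldl stepP (-101, -101)).2 = q ∧
    (nums.foldl stepP (-101, -101)).1 = max p (-101) := by
  have hsp : (PySem.List.sorted nums (fun y => y) false).Perm nums :=
    PySem.List.sorted_perm _ _ false
  have hpw : (PySem.List.sorted nums (fun y => y) false).Pairwise (fun a b => a ≤ b) :=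
    PySem.List.sorted_pairwise _ _
  rw [hs] at hsp hpw
  simp only [List.pairwise_append, List.pairwise_cons] at hpw
  have hup : ∀ x ∈ u, x ≤ p := fun x hx => hpw.2.2 x hx p (by simp)
  have hpq : p ≤ q := by have := hpw.2.1; simp at this; tauto
  have hallq : ∀ x ∈ u ++ [p, q], x ≤ q := by
    intro x hx
    rcases List.mem_append.1 hx with hx | hx
    · exact le_trans (hup x hx) hpq
    · rcases List.mem_cons.1 hx with rfl | hx
      · omega
      · simp at hx; omega
  have hq101 : -101 < q := by
    obtain ⟨m, hm, hm2⟩ := h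
    exact lt_of_lt_of_le hm2 (hallq m (hsp.mem_iff.2 hm))
  obtain ⟨r, hP, hr⟩ := foldP_top2 nums (-101, -101) (by norm_num)
  set F := nums.foldl stepP (-101, -101) with hF
  have hFle : F.1 ≤ F.2 := foldP_le nums (-101, -101) (by norm_num)
  -- permutation between the pool seen through the sorted decomposition and through the fold
  have hM : ((-101 : Int) :: -101 :: (u ++ [p, q])).Perm (F.1 :: F.2 :: r) :=
    ((hsp.cons (-101)).cons (-101)).trans hP
  have hq : F.2 = q := by
    refine (max_eq_of_perm hM (m1 := q) (m2 := F.2) ?_ ?_ ?_ ?_).symm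
    · simp
    · intro x hx
      rcases List.mem_cons.1 hx with rfl | hx
      · omega
      · rcases List.mem_cons.1 hx with rfl | hx
        · omega
        · exact hallq x hx
    · simp
    · intro x hx
      rcases List.mem_cons.1 hx with rfl | hx
      · exact hFle
      · rcases List.mem_cons.1 hx with rfl | hx
        · exact le_refl _
        · exact le_trans (hr x hx) hFle
  refine ⟨hq, ?_⟩
  -- strip the maximum q from both sides
  have hM2 : (F.1 :: r).Perm ((-101 : Int) :: -101 :: u ++ [p]) := by
    have e : ((-101 : Int) :: -101 :: (u ++ [p, q]))
        = (((-101 : Int) :: -101 :: u ++ [p]) ++ [q]) := by simp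
    have t1 : (F.2 :: F.1 :: r).Perm (q :: ((-101 : Int) :: -101 :: u ++ [p])) := by
      refine (perm_swap2 _ _ _).trans (hM.symm.trans ?_)
      rw [e]
      exact List.perm_append_singleton _ _
    rw [hq] at t1
    exact t1.cons_inv
  refine max_eq_of_perm hM2 (m1 := F.1) (m2 := max p (-101)) ?_ ?_ ?_ ?_
  · simp
  · intro x hx
    rcases List.mem_cons.1 hx with rfl | hx
    · exact le_refl _
    · exact hr x hx
  · rcases le_total p (-101) with hcase | hcase
    · rw [max_eq_right hcase]; simp
    · rw [max_eq_left hcase]; simp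
  · intro x hx
    rcases List.mem_cons.1 hx with rfl | hx
    · omega
    · rcases List.mem_cons.1 hx with rfl | hx
      · omega
      · rcases List.mem_append.1 hx with hx | hx
        · exact le_trans (hup x hx) (le_max_left _ _)
        · simp at hx
          exact hx ▸ le_max_left _ _

-- B's value through the sorted decomposition
theorem B_val (nums u : List Int) (p q : Int)
    (hs : PySem.List.sorted nums (fun y => y) false = u ++ [p, q]) :
    solution_alt nums = q + p - (u ++ [p, q]).getD 0 0 := by
  show PySem.List.pyGetD (PySem.List.sorted nums (fun y => y) false) (-1) 0
      + PySem.List.pyGetD (PySem.List.sorted nums (fun y => y) false) (-2) 0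
      - PySem.List.pyGetD (PySem.List.sorted nums (fun y => y) false) 0 0 = _
  rw [hs]
  have e1 : PySem.List.pyGetD (u ++ [p, q]) (-1) 0 = q := by
    have : u ++ [p, q] = (u ++ [p]) ++ [q] := by simp
    rw [this, PySem.List.pyGetD_neg_one_append_singleton]
  have hlen : (u ++ [p, q]).length = u.length + 2 := by simp
  have e2 : PySem.List.pyGetD (u ++ [p, q]) (-2) 0 = p := by
    rw [PySem.List.pyGetD_neg_ofNat (u ++ [p, q]) 2 0 (by omega) (by omega)]
    have hi : (u ++ [p, q]).length - 2 = u.length := by omega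
    simp only [hi]
    rw [List.getElem_append_right (le_refl u.length)]
    simp
  rw [e1, e2, PySem.List.pyGetD_zero]

-- the running minimum is the sorted head, as soon as some element is ≤ 101
theorem min_head (nums : List Int) (hne : nums ≠ [])
    (hex : ∃ n ∈ nums, n ≤ 101) :
    nums.foldl min 101 = (PySem.List.sorted nums (fun y => y) false).getD 0 0 := by
  have hsp : (PySem.List.sorted nums (fun y => y) false).Perm nums :=
    PySem.List.sorted_perm _ _ false
  have hpw : (PySem.List.sorted nums (fun y => y) false).Pairwise (fun a b => a ≤ b) :=
    PySem.List.sorted_pairwise _ _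
  cases hcs : PySem.List.sorted nums (fun y => y) false with
  | nil =>
    have : nums = [] := List.Perm.eq_nil (hcs ▸ hsp).symm
    exact absurd this hne
  | cons h t =>
    rw [hcs] at hsp hpw
    have hhead : ∀ x ∈ nums, h ≤ x := by
      intro x hx
      rcases List.mem_cons.1 (hsp.mem_iff.2 hx) with rfl | hx2
      · exact le_refl _
      · exact (List.pairwise_cons.1 hpw).1 x hx2
    have hmem : h ∈ nums := hsp.mem_iff.1 (by simp)
    have hle : nums.foldl min 101 ≤ h := foldl_min_le nums 101 h (by simp [hmem])
    have hge : h ≤ nums.foldl min 101 := by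
      rcases List.mem_cons.1 (foldl_min_mem nums 101) with he | hm
      · obtain ⟨n, hn, hn2⟩ := hex
        rw [he]
        exact le_trans (hhead n hn) hn2
      · exact hhead _ hm
    simp only [List.getD, List.getElem?_cons_zero, Option.getD_some]
    omega

-- second-largest is ≥ -101 as soon as at least two elements are ≥ -101
theorem decomp_pq_le (nums u : List Int) (p q : Int)
    (hs : PySem.List.sorted nums (fun y => y) false = u ++ [p, q]) : p ≤ q := by
  have hpw : (PySem.List.sorted nums (fun y => y) false).Pairwise (fun a b => a ≤ b) :=
    PySem.List.sorted_pairwise _ _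
  rw [hs] at hpw
  simp only [List.pairwise_append, List.pairwise_cons] at hpw
  have := hpw.2.1; simp at this; tauto

theorem mem_of_decomp (nums u : List Int) (p q x : Int)
    (hs : PySem.List.sorted nums (fun y => y) false = u ++ [p, q])
    (hx : x ∈ u ++ [p, q]) : x ∈ nums := by
  rw [← hs] at hx
  exact (PySem.List.mem_sorted _ _ _ _).1 hx

theorem p_ge_of_count (nums u : List Int) (p q : Int)
    (hs : PySem.List.sorted nums (fun y => y) false = u ++ [p, q])
    (hc : 1 < nums.countP (fun n => decide (-101 ≤ n))) : -101 ≤ p := by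
  by_contra hp
  have hpw : (PySem.List.sorted nums (fun y => y) false).Pairwise (fun a b => a ≤ b) :=
    PySem.List.sorted_pairwise _ _
  rw [hs] at hpw
  simp only [List.pairwise_append, List.pairwise_cons] at hpw
  have hup : ∀ x ∈ u, x ≤ p := fun x hx => hpw.2.2 x hx p (by simp)
  have hcc : nums.countP (fun n => decide (-101 ≤ n))
      = (u ++ [p, q]).countP (fun n => decide (-101 ≤ n)) :=
    ((PySem.List.sorted_perm nums (fun y => y) false).countP_eq _).symm.trans
      (by rw [hs])
  rw [List.countP_append] at hcc
  have hu0 : u.countP (fun n => decide (-101 ≤ n)) = 0 := by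
    rw [List.countP_eq_zero]
    intro x hx
    have := hup x hx
    simp; omega
  have hpq1 : ([p, q]).countP (fun n => decide (-101 ≤ n)) ≤ 1 := by
    have hpf : (decide (-101 ≤ p)) = false := by simp; omega
    simp [List.countP_cons, hpf]
    split_ifs <;> omega
  omega

-- ===== VERDICT (by name: the statement is the Claim_ definition above) =====
theorem solution_spec : Claim_unchanged_solution := by
  intro nums hdom hpre hnd
  have hd := hnd
  unfold D_solution at hd
  push Not at hd
  obtain ⟨⟨hc, n1, hn1, hn1'⟩, n2, hn2, hn2'⟩ := hd
  have hne : nums ≠ [] := by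
    intro h; subst h; simp [Pre_solution] at hpre
  have hlen : 2 ≤ (PySem.List.sorted nums (fun y => y) false).length := by
    rw [PySem.List.length_sorted]; exact hpre
  obtain ⟨u, p, q, hs⟩ := decomp2 _ hlen
  have hex : ∃ m ∈ nums, -101 < m := ⟨n1, hn1, by omega⟩
  obtain ⟨hq, hp1⟩ := pool_top nums u p q hs hex
  have hpge := p_ge_of_count nums u p q hs hc
  show solution nums = solution_alt nums
  rw [A_triggered nums hex, B_val nums u p q hs, hq, hp1, max_eq_left hpge,
    min_head nums hne ⟨n2, hn2, by omega⟩, hs]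
  ring

theorem solution_changed : Claim_changed_solution := by
  unfold Claim_changed_solution; decide

theorem solution_tight : Claim_exact_solution := by
  intro nums hdom hpre hD
  have hne : nums ≠ [] := by
    intro h; subst h; simp [Pre_solution] at hpre
  have hlen : 2 ≤ (PySem.List.sorted nums (fun y => y) false).length := by
    rw [PySem.List.length_sorted]; exact hpre
  obtain ⟨u, p, q, hs⟩ := decomp2 _ hlen
  have hpmem : p ∈ nums := mem_of_decomp nums u p q p hs (by simp)
  have hqmem : q ∈ nums := mem_of_decomp nums u p q q hs (by simp)
  have hpq := decomp_pq_le nums u p q hs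
  by_cases hC2 : ∀ n ∈ nums, n ≤ -101
  · have hA : solution nums = -101 - nums.foldl min 101 := by
      show (nums.foldl loopA (101, [-101])).2.sum
          - (nums.foldl loopA (101, [-101])).1 = _
      rw [foldA_stay nums 101 hC2]
      simp
    have hm := min_head nums hne ⟨q, hqmem, by have := hC2 q hqmem; omega⟩
    rw [hA, B_val nums u p q hs, hm, hs]
    have h1 := hC2 p hpmem
    have h2 := hC2 q hqmem
    omega
  · push Not at hC2
    obtain ⟨n1, hn1, hn1'⟩ := hC2
    have hex : ∃ m ∈ nums, -101 < m := ⟨n1, hn1, by omega⟩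
    obtain ⟨hq, hp1⟩ := pool_top nums u p q hs hex
    by_cases hC3 : ∀ n ∈ nums, 101 < n
    · have hm101 : nums.foldl min 101 = 101 := by
        rcases List.mem_cons.1 (foldl_min_mem nums 101) with he | hm
        · exact he
        · have h1 := hC3 _ hm
          have h2 := foldl_min_le nums 101 101 (by simp)
          omega
      have hhmem : (u ++ [p, q]).getD 0 0 ∈ nums :=
        mem_of_decomp nums u p q _ hs (getD_zero_mem _ 0 (by simp))
      have hhgt := hC3 _ hhmem
      have hpgt : 101 < p := hC3 p hpmem
      rw [A_triggered nums hex, B_val nums u p q hs, hq, hp1,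
        max_eq_left (by omega), hm101]
      omega
    · have hc1 : nums.countP (fun n => decide (-101 ≤ n)) ≤ 1 := by
        rcases hD with (hc | hc) | hc
        · exact hc
        · exact absurd (hc n1 hn1) (by omega)
        · exact absurd hc hC3
      have hplt : p < -101 := by
        by_contra hpge
        push Not at hpge
        have hcc : nums.countP (fun n => decide (-101 ≤ n))
            = (u ++ [p, q]).countP (fun n => decide (-101 ≤ n)) :=
          ((PySem.List.sorted_perm nums (fun y => y) false).countP_eq _).symm.trans
            (by rw [hs])
        rw [List.countP_append] at hcc
        have h2 : 2 ≤ ([p, q]).countP (fun n => decide (-101 ≤ n)) := by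
          have hpt : (decide (-101 ≤ p)) = true := by simp; omega
          have hqt : (decide (-101 ≤ q)) = true := by simp; omega
          simp [hpt, hqt]
        omega
      push Not at hC3
      obtain ⟨n2, hn2, hn2'⟩ := hC3
      rw [A_triggered nums hex, B_val nums u p q hs, hq, hp1,
        max_eq_right (by omega), min_head nums hne ⟨n2, hn2, by omega⟩, hs]
      omega
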